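-- pv_equiv track=rewrite | github.com/agilenature/objectivism-library-semantic-search | src/objlib/entities/extractor.py | _strip_title
-- ===== SOURCE A (Python) =====
-- def _strip_title(text: str) -> str:
--     """Strip common title prefixes from text."""
--     prefixes = ["dr. ", "dr ", "prof. ", "prof ", "professor ", "mr. ", "mr ",
--                  "mrs. ", "mrs ", "ms. ", "ms "]
--     lower = text.casefold()
--     for prefix in prefixes:
--         if lower.startswith(prefix):
--             return lower[len(prefix):]
--     return text
-- ===== SOURCE B (Python) =====
-- def _strip_title(text: str) -> str:
--     """Strip common title prefixes from text."""
--     titles = {"dr.", "dr", "prof.", "prof", "professor",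
--               "mr.", "mr", "mrs.", "mrs", "ms.", "ms"}
--     lower = text.casefold()
--     head, sep, rest = lower.partition(" ")
--     if sep and head in titles:
--         return rest
--     return text
-- ===== Notes on version B (the rewrite author's own statement) =====
-- stated objective: simpler
-- what changed: Replaces the 11-way startswith scan over prefix strings by a single partition at the first space plus one set-membership test of the first token (every prefix is token+space, so first-match-wins collapses to token equality).
import Mathlib
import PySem

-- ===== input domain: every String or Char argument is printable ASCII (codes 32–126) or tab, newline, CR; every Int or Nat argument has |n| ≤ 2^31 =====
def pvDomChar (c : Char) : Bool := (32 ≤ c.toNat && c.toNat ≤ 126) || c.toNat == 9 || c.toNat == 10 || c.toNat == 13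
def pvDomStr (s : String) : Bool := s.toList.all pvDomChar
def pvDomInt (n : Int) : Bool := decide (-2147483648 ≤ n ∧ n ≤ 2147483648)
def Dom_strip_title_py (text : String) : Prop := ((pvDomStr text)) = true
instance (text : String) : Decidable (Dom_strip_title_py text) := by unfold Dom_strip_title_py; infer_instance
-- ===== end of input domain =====

-- B replaces A's per-prefix startswith scan by one partition at the first space and a
-- set-membership test of the first token (simpler; same result on the ASCII domain,
-- where Python's casefold coincides with lower).

-- ===== PORT A =====
-- the prefix list of A, in A's order
def pvPrefixes : List String :=
  ["dr. ", "dr ", "prof. ", "prof ", "professor ", "mr. ", "mr ",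
   "mrs. ", "mrs ", "ms. ", "ms "]

-- the for-loop of A: first prefix that matches wins, else the original text
def pvStripLoop : List String → String → String → String
  | [], _, text => text
  | p :: ps, lower, text =>
      if PySem.Str.startswith lower p
      then PySem.Str.slice lower (some (PySem.Str.len p : Int)) none
      else pvStripLoop ps lower text

def strip_title_py (text : String) : String :=
  -- casefold = lower on the ASCII input domain
  let lower := PySem.Str.lower text
  pvStripLoop pvPrefixes lower text

-- ===== PORT B =====
-- the title-token set of B (as char lists; all distinct, at most one can equal the first token)
def pvTitles : List (List Char) :=
  ["dr.".toList, "dr".toList, "prof.".toList, "prof".toList, "professor".toList,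
   "mr.".toList, "mr".toList, "mrs.".toList, "mrs".toList, "ms.".toList, "ms".toList]

def strip_title_py_alt (text : String) : String :=
  let l := PySem.Chars.lower text.toList     -- casefold = lower on the ASCII domain
  -- str.partition(" ") ported by hand: split at the FIRST occurrence of ' '
  -- (exact: Chars.find points at the first occurrence; -1 = no separator = empty sep part)
  let i := PySem.Chars.find l [' ']
  if i = -1 then text
  else if l.take i.toNat ∈ pvTitles then String.ofList (l.drop (i.toNat + 1)) else text

-- ===== PRECONDITION & SPEC =====
def Spec_strip_title_py (text : String) (out : String) : Prop := out = strip_title_py_alt text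
instance (text : String) (out : String) : Decidable (Spec_strip_title_py text out) := by unfold Spec_strip_title_py; infer_instance

-- ===== CLAIM (what is proved, stated in full; the proofs are below) =====
def Claim_equal_strip_title_py : Prop := ∀ (text : String), Dom_strip_title_py text → Spec_strip_title_py text (strip_title_py text)

-- ===== LEMMAS AND PROOFS =====

theorem pvStripLoop_cons (p : String) (ps : List String) (lower text : String) :
    pvStripLoop (p :: ps) lower text =
      if PySem.Str.startswith lower p
      then PySem.Str.slice lower (some (PySem.Str.len p : Int)) none
      else pvStripLoop ps lower text := rfl

-- no prefix (each of which contains a space) matches a space-free string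
theorem pvLoop_no_space (ps : List String) (lower text : String)
    (hsp : ' ' ∉ lower.toList) (hps : ∀ p ∈ ps, ' ' ∈ p.toList) :
    pvStripLoop ps lower text = text := by
  induction ps with
  | nil => rfl
  | cons p ps ih =>
      have hfalse : PySem.Str.startswith lower p = false := by
        rw [← Bool.not_eq_true]
        intro htrue
        have hpre : p.toList <+: lower.toList := by
          simpa [PySem.Chars.startswith_iff] using htrue
        exact hsp (hpre.subset (hps p (by simp)))
      rw [pvStripLoop_cons, hfalse]
      simpa using ih (fun q hq => hps q (by simp [hq]))

-- with the first space of L at index n, a space-free token t matches as "t ++ ' '" iff t is the head segment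
theorem pvPrefix_space_iff (L t : List Char) (n : Nat)
    (hdrop : L.drop n = ' ' :: L.drop (n + 1))
    (hfirst : ∀ j, j < n → ¬ [' '] <+: L.drop j) (ht : ' ' ∉ t) :
    (t ++ [' ']) <+: L ↔ t = L.take n := by
  have hn : n < L.length := by
    by_contra h
    have : L.drop n = [] := List.drop_eq_nil_iff.mpr (by omega)
    simp [this] at hdrop
  have hLsplit : L = L.take n ++ ' ' :: L.drop (n + 1) := by
    conv_lhs => rw [← List.take_append_drop n L]
    rw [hdrop]
  constructor
  · intro hpre
    obtain ⟨r, hr⟩ := hpre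
    have hdt : L.drop t.length = ' ' :: r := by
      have := congrArg (List.drop t.length) hr
      simpa [List.drop_append] using this.symm
    have hge : n ≤ t.length := by
      by_contra h
      exact hfirst t.length (by omega) ⟨r, by simp [hdt]⟩
    have hle : t.length ≤ n := by
      by_contra h
      have htl : n < t.length := by omega
      have htake : t = L.take t.length := List.prefix_iff_eq_take.mp ⟨' ' :: r, by simpa using hr⟩
      have hmem : ' ' ∈ t := by
        have h1 : t = (L.take n ++ ' ' :: L.drop (n + 1)).take t.length := by
          rw [← hLsplit]; exact htake
        rw [h1, List.take_append]
        apply List.mem_append.mpr; right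
        have hlt : (L.take n).length = n := by rw [List.length_take]; omega
        rw [hlt]
        have hsucc : t.length - n = (t.length - n - 1) + 1 := by omega
        rw [hsucc]
        simp
      exact ht hmem
    have heq : t.length = n := by omega
    have htake : t = L.take t.length := List.prefix_iff_eq_take.mp ⟨' ' :: r, by simpa using hr⟩
    rw [heq] at htake
    exact htake
  · intro h
    subst h
    refine ⟨L.drop (n + 1), ?_⟩
    rw [List.append_assoc]
    exact hLsplit.symm

-- A's loop, on a string whose first space sits at index n, is B's token test
theorem pvLoop_first_space (ps : List String) (lower text : String) (n : Nat)
    (hdrop : lower.toList.drop n = ' ' :: lower.toList.drop (n + 1))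
    (hfirst : ∀ j, j < n → ¬ [' '] <+: lower.toList.drop j)
    (hps : ∀ p ∈ ps, ' ' ∉ p.toList.dropLast ∧ p.toList = p.toList.dropLast ++ [' ']) :
    pvStripLoop ps lower text =
      if lower.toList.take n ∈ ps.map (fun p => p.toList.dropLast)
      then String.ofList (lower.toList.drop (n + 1)) else text := by
  have hn : n < lower.toList.length := by
    by_contra h
    have : lower.toList.drop n = [] := List.drop_eq_nil_iff.mpr (by omega)
    simp [this] at hdrop
  induction ps with
  | nil => simp [pvStripLoop]
  | cons p ps ih =>
      obtain ⟨ht, hp⟩ := hps p (by simp)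
      have hiff := pvPrefix_space_iff lower.toList p.toList.dropLast n hdrop hfirst ht
      by_cases hm : p.toList.dropLast = lower.toList.take n
      · have hpre : p.toList <+: lower.toList := by rw [hp]; exact hiff.mpr hm
        have hsw : PySem.Str.startswith lower p = true := by
          simp [PySem.Chars.startswith_iff, hpre]
        have hlen : p.toList.length = n + 1 := by
          have h1 := congrArg List.length hp
          have h2 := congrArg List.length hm
          rw [List.length_append, List.length_singleton] at h1
          rw [List.length_take] at h2
          omega
        have hval : PySem.Str.slice lower (some (PySem.Str.len p : Int)) none
            = String.ofList (lower.toList.drop (n + 1)) := by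
          apply String.toList_inj.mp
          have hlp : (PySem.Str.len p : Int) = ((n + 1 : Nat) : Int) := by
            simp [PySem.Str.len, ← hlen]
          rw [hlp]
          simp only [PySem.Str.toList_slice, PySem.Chars.slice_eq_listSlice,
            PySem.List.slice_from_natCast, String.toList_ofList]
        have hmem : lower.toList.take n ∈ (p :: ps).map (fun p => p.toList.dropLast) :=
          List.mem_map.mpr ⟨p, List.mem_cons_self .., hm⟩
        rw [pvStripLoop_cons, if_pos hsw, hval, if_pos hmem]
      · have hsw : PySem.Str.startswith lower p = false := by
          rw [← Bool.not_eq_true]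
          intro htrue
          have hpre : p.toList <+: lower.toList := by
            simpa [PySem.Chars.startswith_iff] using htrue
          exact hm (hiff.mp (hp ▸ hpre))
        have hrec := ih (fun q hq => hps q (by simp [hq]))
        rw [pvStripLoop_cons, if_neg (by rw [hsw]; simp), hrec]
        by_cases hq : lower.toList.take n ∈ ps.map (fun p => p.toList.dropLast)
        · have hc : lower.toList.take n ∈ (p :: ps).map (fun p => p.toList.dropLast) := by
            simp only [List.map_cons, List.mem_cons]
            exact Or.inr hq
          rw [if_pos hq, if_pos hc]
        · have hnc : lower.toList.take n ∉ (p :: ps).map (fun p => p.toList.dropLast) := by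
            simp only [List.map_cons, List.mem_cons, not_or]
            exact ⟨fun hh => hm hh.symm, hq⟩
          rw [if_neg hq, if_neg hnc]

-- ===== VERDICT (by name: the statement is the Claim_ definition above) =====
theorem strip_title_py_spec : Claim_equal_strip_title_py := by
  intro text _
  unfold Spec_strip_title_py strip_title_py strip_title_py_alt
  simp only []
  have hL : (PySem.Str.lower text).toList = PySem.Chars.lower text.toList := by simp
  by_cases h : PySem.Chars.find (PySem.Chars.lower text.toList) [' '] = -1
  · have hnin : ' ' ∉ PySem.Chars.lower text.toList := by
      intro hm
      obtain ⟨s, t, hst⟩ := List.append_of_mem hm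
      exact ((PySem.Chars.find_eq_neg_one_iff _ _).mp h) ⟨s, t, by simp [hst]⟩
    rw [pvLoop_no_space pvPrefixes (PySem.Str.lower text) text (by rw [hL]; exact hnin)
        (by decide)]
    simp [h]
  · have h0 : 0 ≤ PySem.Chars.find (PySem.Chars.lower text.toList) [' '] := by
      have := PySem.Chars.neg_one_le_find (s := PySem.Chars.lower text.toList) (sub := [' '])
      omega
    obtain ⟨hpre, hfirst⟩ :=
      PySem.Chars.find_spec (s := PySem.Chars.lower text.toList) (sub := [' ']) h0
    set n := (PySem.Chars.find (PySem.Chars.lower text.toList) [' ']).toNat with hn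
    obtain ⟨r, hr⟩ := hpre
    have hdrop : (PySem.Chars.lower text.toList).drop n
        = ' ' :: (PySem.Chars.lower text.toList).drop (n + 1) := by
      have hr' : (PySem.Chars.lower text.toList).drop n = ' ' :: r := by simpa using hr.symm
      have htl : (PySem.Chars.lower text.toList).drop (n + 1) = r := by
        have := congrArg List.tail hr'
        simpa [List.tail_drop] using this
      rw [hr', htl]
    rw [pvLoop_first_space pvPrefixes (PySem.Str.lower text) text n
        (by rw [hL]; exact hdrop) (by rw [hL]; exact fun j hj => hfirst j hj) (by decide)]
    have hmap : pvPrefixes.map (fun p => p.toList.dropLast) = pvTitles := by decide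
    rw [hL, hmap, if_neg h]
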